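-- pv_equiv track=rewrite | github.com/hahyuning/Coding-test-study | test/카카오/2018 recruitment/level 2/프렌즈4블록 (시뮬레이션).py | check
-- ===== SOURCE A (Python) =====
-- def check(m, n, a):
--     check = [[0] * n for _ in range(m)]
--
--     # 사각형이 같은 모양인지 확인
--     for i in range(m - 1):
--         for j in range(n - 1):
--             if a[i][j] != "." and a[i][j] == a[i + 1][j] == a[i][j + 1] == a[i + 1][j + 1]:
--                 check[i][j] += 1
--                 check[i + 1][j] += 1
--                 check[i][j + 1] += 1
--                 check[i + 1][j + 1] += 1
--
--     # 지워지는 칸 .로 표시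
--     cnt = 0
--     for i in range(m):
--         for j in range(n):
--             if check[i][j] > 0:
--                 cnt += 1
--                 a[i][j] = "."
--
--     return a, cnt
-- ===== SOURCE B (Python) =====
-- def check(m, n, a):
--     # NOTE: like the original, mutates a in place.
--     def block(p, q):
--         if 0 <= p < m - 1 and 0 <= q < n - 1:
--             v = a[p][q]
--             return v != "." and v == a[p + 1][q] and a[p + 1][q] == a[p][q + 1] and a[p][q + 1] == a[p + 1][q + 1]
--         return False
--
--     hits = [(i, j) for i in range(m) for j in range(n)
--             if block(i - 1, j - 1) or block(i - 1, j) or block(i, j - 1) or block(i, j)]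
--     for i, j in hits:
--         a[i][j] = "."
--     return a, len(hits)
-- ===== Notes on version B (the rewrite author's own statement) =====
-- stated objective: alternative
-- what changed: B replaces A's auxiliary m-by-n count grid (per-block marking of four cells, then a full rescan of the count grid) by a per-cell membership test against the at most four 2x2 blocks containing the cell: it collects the hit coordinates in one comprehension and then mutates exactly those cells.
import Mathlib
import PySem

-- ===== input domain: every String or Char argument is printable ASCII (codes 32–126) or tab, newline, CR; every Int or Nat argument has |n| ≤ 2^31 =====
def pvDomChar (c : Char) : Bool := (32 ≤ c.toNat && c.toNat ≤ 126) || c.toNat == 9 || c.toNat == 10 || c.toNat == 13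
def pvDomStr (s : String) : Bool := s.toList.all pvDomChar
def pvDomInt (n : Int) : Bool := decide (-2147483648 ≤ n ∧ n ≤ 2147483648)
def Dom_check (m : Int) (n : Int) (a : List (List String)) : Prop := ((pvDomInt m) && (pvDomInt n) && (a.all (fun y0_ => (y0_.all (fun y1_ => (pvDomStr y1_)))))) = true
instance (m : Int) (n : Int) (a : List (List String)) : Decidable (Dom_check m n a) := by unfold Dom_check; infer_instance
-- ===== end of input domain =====

-- B replaces A's count grid + full rescan by a per-cell membership test against the (at most four)
-- 2x2 blocks containing the cell, collecting the hit coordinates once and mutating exactly those.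
-- Like A, the Python B mutates `a` in place; the equivalence proved here is about the return value.

-- shared low-level reads/writes (Python a[i][j] and a[i][j] = v; total forms, exact on in-range indices)
def pvCell (a : List (List String)) (i j : Int) : String :=
  PySem.List.pyGetD (PySem.List.pyGetD a i []) j ""

def pvSet (g : List (List String)) (i j : Int) (v : String) : List (List String) :=
  PySem.List.pySetD g i (PySem.List.pySetD (PySem.List.pyGetD g i []) j v)

-- ===== PORT A =====
-- check[i][j] += 1
def pvInc (c : List (List Int)) (i j : Int) : List (List Int) :=
  PySem.List.pySetD c i
    (PySem.List.pySetD (PySem.List.pyGetD c i []) j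
      (PySem.List.pyGetD (PySem.List.pyGetD c i []) j 0 + 1))

def check (m : Int) (n : Int) (a : List (List String)) : List (List String) × Int :=
  let chk0 : List (List Int) :=
    (PySem.List.pyRange 0 m 1).map (fun _ => PySem.List.pyRepeat [(0 : Int)] n)
  let chk : List (List Int) :=
    (PySem.List.pyRange 0 (m - 1) 1).foldl (fun c i =>
      (PySem.List.pyRange 0 (n - 1) 1).foldl (fun c j =>
        if pvCell a i j ≠ "." ∧ pvCell a i j = pvCell a (i + 1) j ∧
            pvCell a (i + 1) j = pvCell a i (j + 1) ∧
            pvCell a i (j + 1) = pvCell a (i + 1) (j + 1) then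
          pvInc (pvInc (pvInc (pvInc c i j) (i + 1) j) i (j + 1)) (i + 1) (j + 1)
        else c) c) chk0
  (PySem.List.pyRange 0 m 1).foldl (fun s i =>
    (PySem.List.pyRange 0 n 1).foldl (fun s j =>
      if PySem.List.pyGetD (PySem.List.pyGetD chk i []) j 0 > 0 then
        (pvSet s.1 i j ".", s.2 + 1)
      else s) s) (a, 0)

-- ===== PORT B =====
-- block(p, q): is (p, q) an in-range 2x2 block whose four cells are equal and not "."?
def pvBlockB (m n : Int) (a : List (List String)) (p q : Int) : Bool :=
  if 0 ≤ p ∧ p < m - 1 ∧ 0 ≤ q ∧ q < n - 1 then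
    decide (pvCell a p q ≠ "." ∧ pvCell a p q = pvCell a (p + 1) q ∧
      pvCell a (p + 1) q = pvCell a p (q + 1) ∧
      pvCell a p (q + 1) = pvCell a (p + 1) (q + 1))
  else false

def check_alt (m : Int) (n : Int) (a : List (List String)) : List (List String) × Int :=
  let hits : List (Int × Int) :=
    (PySem.List.pyRange 0 m 1).flatMap (fun i =>
      ((PySem.List.pyRange 0 n 1).filter (fun j =>
        pvBlockB m n a (i - 1) (j - 1) || pvBlockB m n a (i - 1) j ||
        pvBlockB m n a i (j - 1) || pvBlockB m n a i j)).map (fun j => (i, j)))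
  (hits.foldl (fun g ij => pvSet g ij.1 ij.2 ".") a, (hits.length : Int))

-- ===== PRECONDITION & SPEC =====
-- 0 <= i < len(a) and 0 <= j < len(a[i])
def pvInB (a : List (List String)) (i j : Int) : Bool :=
  decide (0 ≤ i ∧ i < (a.length : Int) ∧ 0 ≤ j ∧ j < ((PySem.List.pyGetD a i []).length : Int))

-- the reads A's short-circuiting condition actually performs at block (i, j) are all in range
def pvSafeBlock (a : List (List String)) (i j : Int) : Bool :=
  pvInB a i j &&
    (pvCell a i j == "." ||
      (pvInB a (i + 1) j &&
        (pvCell a i j != pvCell a (i + 1) j ||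
          (pvInB a i (j + 1) &&
            (pvCell a (i + 1) j != pvCell a i (j + 1) || pvInB a (i + 1) (j + 1))))))

-- guarded row scan: every block read in row i is safe; the two guards bound the scans by the
-- grid's actual size (they are equivalent: a missing row/short row is itself an unsafe read)
def pvRowSafe (a : List (List String)) (n : Int) (i : Int) : Bool :=
  if ((PySem.List.pyGetD a i []).length : Int) < n - 1 then false
  else (PySem.List.pyRange 0 (n - 1) 1).all (fun j => pvSafeBlock a i j)

def pvPreB (m : Int) (n : Int) (a : List (List String)) : Bool :=
  if m ≤ 1 || n ≤ 1 then true
  else if (a.length : Int) < m - 1 then false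
  else (PySem.List.pyRange 0 (m - 1) 1).all (fun i => pvRowSafe a n i)

-- Pre_ is exact: A raises (IndexError) iff some block scan performs an out-of-range read;
-- because Python's `and`/chained comparison short-circuit, safety depends on the cell values too.
def Pre_check (m : Int) (n : Int) (a : List (List String)) : Prop :=
  pvPreB m n a = true
instance (m : Int) (n : Int) (a : List (List String)) : Decidable (Pre_check m n a) := by
  unfold Pre_check; infer_instance

def pvWitness_check : Int × Int × List (List String) := (2, 2, [["a", "a"], ["a", "a"]])

def Spec_check (m : Int) (n : Int) (a : List (List String)) (out : List (List String) × Int) : Prop := out = check_alt m n a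
instance (m : Int) (n : Int) (a : List (List String)) (out : List (List String) × Int) : Decidable (Spec_check m n a out) := by unfold Spec_check; infer_instance

-- ===== CLAIM (what is proved, stated in full; the proofs are below) =====
def Claim_equal_check : Prop := ∀ (m : Int) (n : Int) (a : List (List String)), Dom_check m n a → Pre_check m n a → Spec_check m n a (check m n a)


-- ===== LEMMAS AND PROOFS =====

def pvRead (c : List (List Int)) (i j : Int) : Int :=
  PySem.List.pyGetD (PySem.List.pyGetD c i []) j 0

abbrev pvQ (a : List (List String)) (i j : Int) : Prop :=
  pvCell a i j ≠ "." ∧ pvCell a i j = pvCell a (i + 1) j ∧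
    pvCell a (i + 1) j = pvCell a i (j + 1) ∧
    pvCell a i (j + 1) = pvCell a (i + 1) (j + 1)
def pvCellsL (m n : Int) : List (Int × Int) :=
  (PySem.List.pyRange 0 m 1).flatMap (fun i => (PySem.List.pyRange 0 n 1).map (fun j => (i, j)))
def pvMarkCells (m n : Int) (a : List (List String)) : List (Int × Int) :=
  ((pvCellsL (m - 1) (n - 1)).filter (fun b => decide (pvQ a b.1 b.2))).flatMap
    (fun b => [(b.1, b.2), (b.1 + 1, b.2), (b.1, b.2 + 1), (b.1 + 1, b.2 + 1)])
def pvChkA (m n : Int) (a : List (List String)) : List (List Int) :=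
  (PySem.List.pyRange 0 (m - 1) 1).foldl (fun c i =>
    (PySem.List.pyRange 0 (n - 1) 1).foldl (fun c j =>
      if pvQ a i j then
        pvInc (pvInc (pvInc (pvInc c i j) (i + 1) j) i (j + 1)) (i + 1) (j + 1)
      else c) c) ((PySem.List.pyRange 0 m 1).map (fun _ => PySem.List.pyRepeat [(0 : Int)] n))

def pvOrB (m n : Int) (a : List (List String)) (i j : Int) : Bool :=
  pvBlockB m n a (i - 1) (j - 1) || pvBlockB m n a (i - 1) j ||
    pvBlockB m n a i (j - 1) || pvBlockB m n a i j

def pvWf (c : List (List Int)) (M N : Nat) : Prop :=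
  c.length = M ∧ ∀ k (h : k < c.length), (c.get ⟨k, h⟩).length = N

theorem pv_foldl_nested {g : Type} (l1 l2 : List Int) (h : g → (Int × Int) → g) (init : g) :
    l1.foldl (fun s i => l2.foldl (fun s j => h s (i, j)) s) init
      = (l1.flatMap (fun i => l2.map (fun j => (i, j)))).foldl h init := by
  rw [List.foldl_flatMap]
  simp only [List.foldl_map]

theorem pv_mem_cellsL (m n i j : Int) :
    (i, j) ∈ pvCellsL m n ↔ (0 ≤ i ∧ i < m) ∧ (0 ≤ j ∧ j < n) := by
  simp [pvCellsL, List.mem_flatMap, List.mem_map, PySem.List.mem_pyRange_one]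

theorem pv_wf_pvInc (c : List (List Int)) (M N : Nat) (p q : Int)
    (hw : pvWf c M N) (hp : 0 ≤ p) : pvWf (pvInc c p q) M N := by
  obtain ⟨h1, h2⟩ := hw
  unfold pvInc
  rw [PySem.List.pySetD_of_nonneg _ _ hp]
  refine ⟨by simp [h1], ?_⟩
  intro k hk
  simp only [List.length_set] at hk
  simp only [List.get_eq_getElem, List.getElem_set]
  split
  · next heq =>
    subst heq
    have hplt : (p.toNat : Int) < (c.length : Int) := by
      have := Int.toNat_of_nonneg hp; omega
    rw [PySem.List.length_pySetD]
    rw [PySem.List.pyGetD_eq_getElem c [] hp (by omega)]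
    exact h2 p.toNat hk
  · exact h2 k hk

theorem pv_read_pvInc (c : List (List Int)) (M N : Nat) (p q i j : Int)
    (hw : pvWf c M N) (hp : 0 ≤ p ∧ p < (M : Int)) (hq : 0 ≤ q ∧ q < (N : Int))
    (hi : 0 ≤ i) (hj : 0 ≤ j) :
    pvRead (pvInc c p q) i j = pvRead c i j + (if (p, q) = (i, j) then 1 else 0) := by
  obtain ⟨h1, h2⟩ := hw
  have hpc : p.toNat < c.length := by omega
  have hqr : q.toNat < (PySem.List.pyGetD c p []).length := by
    rw [PySem.List.pyGetD_eq_getElem c [] hp.1 (by omega)]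
    have := h2 p.toNat hpc
    simp only [List.get_eq_getElem] at this
    omega
  have ep : p = ((p.toNat : Nat) : Int) := by omega
  have eq' : q = ((q.toNat : Nat) : Int) := by omega
  have ei : i = ((i.toNat : Nat) : Int) := by omega
  have ej : j = ((j.toNat : Nat) : Int) := by omega
  unfold pvInc pvRead
  rw [ep, eq', ei, ej]
  rw [PySem.List.pyGetD_pySetD_natCast c p.toNat i.toNat _ [] hpc]
  have hqr' : q.toNat < (PySem.List.pyGetD c ((p.toNat : Nat) : Int) []).length := by
    rw [← ep]; exact hqr
  by_cases hip : i.toNat = p.toNat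
  · rw [if_pos hip]
    rw [PySem.List.pyGetD_pySetD_natCast _ q.toNat j.toNat _ 0 hqr']
    by_cases hjq : j.toNat = q.toNat
    · rw [if_pos hjq, if_pos (by simp only [Prod.mk.injEq]; omega), hjq, hip]
    · rw [if_neg hjq, if_neg (by simp only [Prod.mk.injEq]; omega), hip]
      omega
  · rw [if_neg hip, if_neg (by simp only [Prod.mk.injEq]; omega)]
    omega

theorem pv_read_foldl_inc (cl : List (Int × Int)) (c : List (List Int)) (M N : Nat)
    (hw : pvWf c M N)
    (hcl : ∀ x ∈ cl, 0 ≤ x.1 ∧ x.1 < (M : Int) ∧ 0 ≤ x.2 ∧ x.2 < (N : Int))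
    (i j : Int) (hi : 0 ≤ i) (hj : 0 ≤ j) :
    pvRead (cl.foldl (fun c p => pvInc c p.1 p.2) c) i j
      = pvRead c i j + (cl.count (i, j) : Int) := by
  induction cl generalizing c with
  | nil => simp
  | cons hd tl ih =>
    have hhd := hcl hd (by simp)
    rw [List.foldl_cons]
    rw [ih (pvInc c hd.1 hd.2) (pv_wf_pvInc c M N hd.1 hd.2 hw hhd.1)
      (fun x hx => hcl x (by simp [hx]))]
    rw [pv_read_pvInc c M N hd.1 hd.2 i j hw ⟨hhd.1, hhd.2.1⟩ ⟨hhd.2.2.1, hhd.2.2.2⟩ hi hj]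
    rw [List.count_cons]
    by_cases h : hd = (i, j)
    · rw [if_pos (by rw [← h]), if_pos (by exact beq_iff_eq.mpr h)]
      push_cast; ring
    · rw [if_neg (by intro hc; exact h (by rwa [Prod.mk.eta] at hc)), if_neg (by simpa using h)]
      push_cast; ring

theorem pv_read_zero_grid (m n i j : Int) (hi : 0 ≤ i) (hj : 0 ≤ j) :
    pvRead ((PySem.List.pyRange 0 m 1).map (fun _ => PySem.List.pyRepeat [(0 : Int)] n)) i j = 0 := by
  unfold pvRead
  by_cases him : i < m
  · rw [PySem.List.pyGetD_map_pyRange_of_nonneg _ m i [] hi him]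
    rw [PySem.List.pyRepeat_singleton]
    have ej : j = ((j.toNat : Nat) : Int) := by omega
    rw [ej, PySem.List.pyGetD_natCast]
    simp [List.getD, List.getElem?_replicate]
    split <;> rfl
  · have hlen : ((PySem.List.pyRange 0 m 1).map (fun _ => PySem.List.pyRepeat [(0 : Int)] n)).length ≤ i.toNat := by
      simp [PySem.List.length_pyRange_one]
      omega
    have ei : i = ((i.toNat : Nat) : Int) := by omega
    rw [ei, PySem.List.pyGetD_natCast]
    rw [List.getD_eq_getElem?_getD, List.getElem?_eq_none (by omega)]
    simp [PySem.List.pyGetD, PySem.List.pyGet?, PySem.List.pyIdx?]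

theorem pv_chkA_eq (m n : Int) (a : List (List String)) :
    pvChkA m n a = (pvMarkCells m n a).foldl (fun c p => pvInc c p.1 p.2)
      ((PySem.List.pyRange 0 m 1).map (fun _ => PySem.List.pyRepeat [(0 : Int)] n)) := by
  unfold pvChkA pvMarkCells
  rw [pv_foldl_nested (h := fun c ij =>
    if pvQ a ij.1 ij.2 then
      pvInc (pvInc (pvInc (pvInc c ij.1 ij.2) (ij.1 + 1) ij.2) ij.1 (ij.2 + 1)) (ij.1 + 1) (ij.2 + 1)
    else c)]
  conv_rhs => rw [List.foldl_flatMap, List.foldl_filter]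
  simp only [List.foldl_cons, List.foldl_nil, decide_eq_true_eq]
  unfold pvCellsL
  rfl

theorem pv_read_chkA_pos_iff (m n : Int) (a : List (List String)) (i j : Int)
    (hi : 0 ≤ i) (hj : 0 ≤ j) :
    (0 < pvRead (pvChkA m n a) i j) ↔ (i, j) ∈ pvMarkCells m n a := by
  have hw : pvWf ((PySem.List.pyRange 0 m 1).map (fun _ => PySem.List.pyRepeat [(0 : Int)] n))
      m.toNat n.toNat := by
    constructor
    · simp [PySem.List.length_pyRange_one]
    · intro k hk
      simp only [List.get_eq_getElem, List.getElem_map]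
      simp [PySem.List.pyRepeat_singleton]
  have hcl : ∀ x ∈ pvMarkCells m n a,
      0 ≤ x.1 ∧ x.1 < (m.toNat : Int) ∧ 0 ≤ x.2 ∧ x.2 < (n.toNat : Int) := by
    intro x hx
    simp only [pvMarkCells, List.mem_flatMap, List.mem_filter] at hx
    obtain ⟨b, ⟨hb, _⟩, hxb⟩ := hx
    have hbm := (pv_mem_cellsL (m - 1) (n - 1) b.1 b.2).mp hb
    simp only [List.mem_cons, List.not_mem_nil, or_false] at hxb
    rcases hxb with h | h | h | h <;> subst h <;> simp only [] <;>
      refine ⟨by omega, by omega, by omega, by omega⟩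
  rw [pv_chkA_eq, pv_read_foldl_inc _ _ m.toNat n.toNat hw hcl i j hi hj,
    pv_read_zero_grid m n i j hi hj]
  simp [List.count_pos_iff]

theorem pv_blockB_iff (m n : Int) (a : List (List String)) (p q : Int) :
    pvBlockB m n a p q = true ↔
      ((0 ≤ p ∧ p < m - 1) ∧ (0 ≤ q ∧ q < n - 1)) ∧ pvQ a p q := by
  unfold pvBlockB
  split
  · next h => simp [pvQ]; tauto
  · next h => simp [pvQ]; tauto

theorem pv_mem_markCells_iff (m n : Int) (a : List (List String)) (i j : Int) :
    (i, j) ∈ pvMarkCells m n a ↔ pvOrB m n a i j = true := by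
  simp only [pvMarkCells, List.mem_flatMap, List.mem_filter, List.mem_cons,
    List.not_mem_nil, or_false, pvOrB, Bool.or_eq_true, pv_blockB_iff]
  constructor
  · rintro ⟨⟨b1, b2⟩, ⟨hb, hq⟩, hx⟩
    have hbm := (pv_mem_cellsL (m - 1) (n - 1) b1 b2).mp hb
    rw [decide_eq_true_eq] at hq
    simp only [Prod.mk.injEq] at hx
    rcases hx with ⟨h1, h2⟩ | ⟨h1, h2⟩ | ⟨h1, h2⟩ | ⟨h1, h2⟩
    · exact Or.inr ⟨⟨⟨by omega, by omega⟩, by omega, by omega⟩, by rw [h1, h2]; exact hq⟩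
    · exact Or.inl (Or.inl (Or.inr ⟨⟨⟨by omega, by omega⟩, by omega, by omega⟩,
        by rw [show i - 1 = b1 by omega, show j = b2 by omega]; exact hq⟩))
    · exact Or.inl (Or.inr ⟨⟨⟨by omega, by omega⟩, by omega, by omega⟩,
        by rw [show i = b1 by omega, show j - 1 = b2 by omega]; exact hq⟩)
    · exact Or.inl (Or.inl (Or.inl ⟨⟨⟨by omega, by omega⟩, by omega, by omega⟩,
        by rw [show i - 1 = b1 by omega, show j - 1 = b2 by omega]; exact hq⟩))
  · rintro (((⟨hb, hq⟩ | ⟨hb, hq⟩) | ⟨hb, hq⟩) | ⟨hb, hq⟩)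
    · exact ⟨(i - 1, j - 1), ⟨(pv_mem_cellsL _ _ _ _).mpr ⟨⟨hb.1.1, hb.1.2⟩, hb.2⟩, by exact decide_eq_true hq⟩,
        by simp⟩
    · exact ⟨(i - 1, j), ⟨(pv_mem_cellsL _ _ _ _).mpr ⟨⟨hb.1.1, hb.1.2⟩, hb.2⟩, by exact decide_eq_true hq⟩,
        by simp⟩
    · exact ⟨(i, j - 1), ⟨(pv_mem_cellsL _ _ _ _).mpr ⟨⟨hb.1.1, hb.1.2⟩, hb.2⟩, by exact decide_eq_true hq⟩,
        by simp⟩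
    · exact ⟨(i, j), ⟨(pv_mem_cellsL _ _ _ _).mpr ⟨⟨hb.1.1, hb.1.2⟩, hb.2⟩, by exact decide_eq_true hq⟩,
        by simp⟩

theorem pv_foldl_pair_if (l : List (Int × Int)) (p : Int × Int → Bool)
    (a0 : List (List String)) (c0 : Int) :
    l.foldl (fun s ij => if p ij then (pvSet s.1 ij.1 ij.2 ".", s.2 + 1) else s) (a0, c0)
      = ((l.filter p).foldl (fun g ij => pvSet g ij.1 ij.2 ".") a0,
          c0 + ((l.filter p).length : Int)) := by
  induction l generalizing a0 c0 with
  | nil => simp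
  | cons hd tl ih =>
    by_cases h : p hd = true
    · rw [List.foldl_cons, if_pos h, ih, List.filter_cons_of_pos h,
        List.foldl_cons, List.length_cons]
      refine Prod.ext rfl ?_
      push_cast; ring
    · rw [List.foldl_cons, if_neg (by simpa using h), ih,
        List.filter_cons_of_neg (by simpa using h)]


theorem check_eq_total (m n : Int) (a : List (List String)) : check m n a = check_alt m n a := by
  have hA : check m n a = (PySem.List.pyRange 0 m 1).foldl (fun s i =>
      (PySem.List.pyRange 0 n 1).foldl (fun s j =>
        if 0 < pvRead (pvChkA m n a) i j then (pvSet s.1 i j ".", s.2 + 1) else s) s)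
      (a, 0) := rfl
  have hhits : (PySem.List.pyRange 0 m 1).flatMap (fun i =>
      ((PySem.List.pyRange 0 n 1).filter (fun j => pvOrB m n a i j)).map (fun j => (i, j)))
      = (pvCellsL m n).filter (fun ij => pvOrB m n a ij.1 ij.2) := by
    unfold pvCellsL
    rw [List.filter_flatMap]
    congr 1
    funext i
    rw [List.filter_map]
    rfl
  have hB : check_alt m n a = (((pvCellsL m n).filter (fun ij => pvOrB m n a ij.1 ij.2)).foldl
      (fun g ij => pvSet g ij.1 ij.2 ".") a,
      (((pvCellsL m n).filter (fun ij => pvOrB m n a ij.1 ij.2)).length : Int)) := by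
    show ((_ : List (Int × Int)).foldl _ a, _) = _
    rw [← hhits]
    rfl
  rw [hA, hB]
  rw [pv_foldl_nested (h := fun s ij =>
    if 0 < pvRead (pvChkA m n a) ij.1 ij.2 then (pvSet s.1 ij.1 ij.2 ".", s.2 + 1) else s)]
  have hcond : (fun (s : List (List String) × Int) (ij : Int × Int) =>
      if 0 < pvRead (pvChkA m n a) ij.1 ij.2 then (pvSet s.1 ij.1 ij.2 ".", s.2 + 1) else s)
      = (fun s ij => if (fun ij : Int × Int => decide (0 < pvRead (pvChkA m n a) ij.1 ij.2)) ij
          then (pvSet s.1 ij.1 ij.2 ".", s.2 + 1) else s) := by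
    funext s ij
    simp
  rw [hcond, pv_foldl_pair_if]
  have hfilter : (pvCellsL m n).filter (fun ij => decide (0 < pvRead (pvChkA m n a) ij.1 ij.2))
      = (pvCellsL m n).filter (fun ij => pvOrB m n a ij.1 ij.2) := by
    apply List.filter_congr
    intro x hx
    obtain ⟨x1, x2⟩ := x
    have hb := (pv_mem_cellsL m n x1 x2).mp hx
    have hiff : (0 < pvRead (pvChkA m n a) x1 x2) ↔ (pvOrB m n a x1 x2 = true) :=
      (pv_read_chkA_pos_iff m n a x1 x2 (by omega) (by omega)).trans
        (pv_mem_markCells_iff m n a x1 x2)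
    simp [hiff]
  have e : List.flatMap (fun i => List.map (fun j => (i, j)) (PySem.List.pyRange 0 n 1))
      (PySem.List.pyRange 0 m 1) = pvCellsL m n := rfl
  rw [e, hfilter]
  simp

-- ===== VERDICT (by name: the statement is the Claim_ definition above) =====
theorem check_spec : Claim_equal_check := by
  intro m n a _ _
  unfold Spec_check
  exact check_eq_total m n a
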